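-- pv_equiv track=rewrite | github.com/philipdaubmeier/pixelpast-core | alembic/versions/20260330_0017_asset_short_id_schema_and_backfill.py | _encode_base58_fixed
-- ===== SOURCE A (Python) =====
-- _ALPHABET = "123456789ABCDEFGHJKLMNPQRSTUVWXYZabcdefghijkmnopqrstuvwxyz"
--
-- _SHORT_ID_LENGTH = 8
--
-- def _encode_base58_fixed(value: int) -> str:
--     characters: list[str] = []
--     remaining = value
--
--     for _ in range(_SHORT_ID_LENGTH):
--         remaining, remainder = divmod(remaining, len(_ALPHABET))
--         characters.append(_ALPHABET[remainder])
--
--     characters.reverse()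
--     return "".join(characters)
-- ===== SOURCE B (Python) =====
-- _ALPHABET = "123456789ABCDEFGHJKLMNPQRSTUVWXYZabcdefghijkmnopqrstuvwxyz"
--
-- _SHORT_ID_LENGTH = 8
--
--
-- def _encode_base58_fixed(value: int) -> str:
--     base = len(_ALPHABET)
--     return "".join(
--         _ALPHABET[(value // base**i) % base]
--         for i in range(_SHORT_ID_LENGTH - 1, -1, -1)
--     )
-- ===== Notes on version B (the rewrite author's own statement) =====
-- stated objective: alternative
-- what changed: B computes each fixed-width base-58 digit independently from its positional weight, (value // base**position) % base from the most significant position down, instead of threading a running quotient through divmod and reversing the collected digits at the end.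
import Mathlib
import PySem

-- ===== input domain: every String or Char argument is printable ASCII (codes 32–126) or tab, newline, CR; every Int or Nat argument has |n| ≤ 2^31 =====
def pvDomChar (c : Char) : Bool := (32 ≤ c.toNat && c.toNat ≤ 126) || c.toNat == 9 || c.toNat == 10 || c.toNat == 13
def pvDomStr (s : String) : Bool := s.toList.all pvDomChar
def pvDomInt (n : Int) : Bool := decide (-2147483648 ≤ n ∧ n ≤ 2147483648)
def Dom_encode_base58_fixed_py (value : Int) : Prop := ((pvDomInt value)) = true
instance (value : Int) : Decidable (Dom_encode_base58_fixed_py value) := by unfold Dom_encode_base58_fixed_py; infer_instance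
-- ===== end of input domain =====

-- B computes each of the 8 base-58 digits directly from its positional weight (value // 58**i) % 58,
-- most-significant first, removing A's running-quotient accumulator and the final reverse (objective: alternative decomposition).

-- _ALPHABET, as a list of its characters (len(_ALPHABET) = 58)
def pvAlphabet : List Char :=
  "123456789ABCDEFGHJKLMNPQRSTUVWXYZabcdefghijkmnopqrstuvwxyz".toList

-- ===== PORT A =====
-- divmod(remaining, 58): divisor is the nonzero literal 58, so floordiv/mod are exact here.
-- _ALPHABET[remainder]: remainder = mod _ 58 is always in [0,58), so pyGetD is exact (index always in range).
def encode_base58_fixed_py (value : Int) : String :=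
  let st := (List.range 8).foldl (fun (st : Int × List Char) _ =>
    (PySem.Int.floordiv st.1 58,
     st.2 ++ [PySem.List.pyGetD pvAlphabet (PySem.Int.mod st.1 58) ' '])) (value, [])
  String.mk st.2.reverse

-- ===== PORT B =====
-- 58**i: i ranges over 7..0, all nonnegative, so 58 ^ i.toNat is exact.
def encode_base58_fixed_py_alt (value : Int) : String :=
  String.mk ((PySem.List.pyRange 7 (-1) (-1)).map (fun i =>
    PySem.List.pyGetD pvAlphabet
      (PySem.Int.mod (PySem.Int.floordiv value (58 ^ i.toNat)) 58) ' '))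

-- ===== PRECONDITION & SPEC =====
def Spec_encode_base58_fixed_py (value : Int) (out : String) : Prop := out = encode_base58_fixed_py_alt value
instance (value : Int) (out : String) : Decidable (Spec_encode_base58_fixed_py value out) := by unfold Spec_encode_base58_fixed_py; infer_instance

-- ===== CLAIM (what is proved, stated in full; the proofs are below) =====
def Claim_equal_encode_base58_fixed_py : Prop := ∀ (value : Int), Dom_encode_base58_fixed_py value → Spec_encode_base58_fixed_py value (encode_base58_fixed_py value)

-- ===== LEMMAS AND PROOFS =====

-- floor division by positive divisors composes: (v // n) // 58 = v // (n * 58)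
lemma pv_fdiv_fdiv (v n : Int) (hn : 0 < n) :
    PySem.Int.floordiv (PySem.Int.floordiv v n) 58 = PySem.Int.floordiv v (n * 58) := by
  rw [PySem.Int.floordiv_eq_ediv_of_pos hn,
      PySem.Int.floordiv_eq_ediv_of_pos (by norm_num : (0:Int) < 58),
      PySem.Int.floordiv_eq_ediv_of_pos (by positivity)]
  exact Int.ediv_ediv_of_nonneg hn.le

lemma pv_range8 : List.range 8 = [0,1,2,3,4,5,6,7] := by decide

lemma pv_pyRange_down : PySem.List.pyRange 7 (-1) (-1) = [7,6,5,4,3,2,1,0] := by decide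

-- ===== VERDICT (by name: the statement is the Claim_ definition above) =====
theorem encode_base58_fixed_py_spec : Claim_equal_encode_base58_fixed_py := by
  intro v _
  unfold Spec_encode_base58_fixed_py encode_base58_fixed_py encode_base58_fixed_py_alt
  rw [pv_range8, pv_pyRange_down]
  simp only [List.foldl, List.map, List.reverse]
  rw [pv_fdiv_fdiv v 58 (by norm_num),
      pv_fdiv_fdiv v (58*58) (by norm_num),
      pv_fdiv_fdiv v (58*58*58) (by norm_num),
      pv_fdiv_fdiv v (58*58*58*58) (by norm_num),
      pv_fdiv_fdiv v (58*58*58*58*58) (by norm_num),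
      pv_fdiv_fdiv v (58*58*58*58*58*58) (by norm_num)]
  norm_num [show Int.toNat 7 = 7 from rfl, show Int.toNat 6 = 6 from rfl, show Int.toNat 5 = 5 from rfl,
    show Int.toNat 4 = 4 from rfl, show Int.toNat 3 = 3 from rfl, show Int.toNat 2 = 2 from rfl]
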